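-- pv_equiv track=rewrite | github.com/clementbernardd/hackaton_ondes | python/utils.py | get_indexes_trames
-- ===== SOURCE A (Python) =====
-- def get_indexes_trames(auto_bins, peaks_pred,peaks) :
--   ''' Return the trames for lock, login and mdp '''
--   indexes = {'lock' : [0], 'login' : [], 'mdp' : []}
--   c = peaks_pred[0]
--   i = 0
--   for j , (peak, classe) in enumerate(zip(peaks, peaks_pred)) :
--     if classe != c :
--       indexes[  list(indexes.keys())[i] ].append(j)
--       if i < 3 :
--         indexes[  list(indexes.keys())[i+1] ].append(j)
--       c = classe
--       i+=1
--   indexes['mdp'].append(len(auto_bins)-1)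
--   return indexes
-- ===== SOURCE B (Python) =====
-- def get_indexes_trames(auto_bins, peaks_pred, peaks):
--     ''' Return the trames for lock, login and mdp '''
--     # Pass 1: detect the change points of the class sequence.
--     prev = peaks_pred[0]
--     changes = []
--     for j, classe in enumerate(peaks_pred[:len(peaks)]):
--         if classe != prev:
--             changes.append(j)
--             prev = classe
--     # Pass 2: distribute the k-th change to key k (end) and key k+1 (start).
--     keys = ['lock', 'login', 'mdp']
--     indexes = {'lock': [0], 'login': [], 'mdp': []}
--     for k, j in enumerate(changes):
--         indexes[keys[k]].append(j)
--         if k + 1 < len(keys):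
--             indexes[keys[k + 1]].append(j)
--     indexes['mdp'].append(len(auto_bins) - 1)
--     return indexes
-- ===== Notes on version B (the rewrite author's own statement) =====
-- stated objective: alternative
-- what changed: Replaces A's one-pass state machine (a running class, a counter i, and dict mutations keyed by list(indexes.keys())[i] inside the scan) by a detect-then-distribute two-pass structure: pass 1 collects the change-point indices of the class sequence, pass 2 distributes the k-th change to keys[k] and keys[k+1] over a static key list.
import Mathlib
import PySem

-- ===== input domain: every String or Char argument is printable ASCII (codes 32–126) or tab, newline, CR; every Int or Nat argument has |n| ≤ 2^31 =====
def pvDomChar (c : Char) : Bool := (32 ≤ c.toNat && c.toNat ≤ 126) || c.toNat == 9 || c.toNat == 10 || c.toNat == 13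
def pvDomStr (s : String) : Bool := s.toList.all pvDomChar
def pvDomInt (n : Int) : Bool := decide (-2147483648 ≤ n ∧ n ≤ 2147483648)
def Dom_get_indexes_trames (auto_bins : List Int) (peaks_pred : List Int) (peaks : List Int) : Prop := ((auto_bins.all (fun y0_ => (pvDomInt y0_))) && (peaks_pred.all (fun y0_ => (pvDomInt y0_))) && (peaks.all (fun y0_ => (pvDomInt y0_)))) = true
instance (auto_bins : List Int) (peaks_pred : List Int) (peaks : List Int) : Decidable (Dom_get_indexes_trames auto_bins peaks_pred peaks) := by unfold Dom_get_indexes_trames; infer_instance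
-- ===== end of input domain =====

-- B replaces A's one-pass state machine (running class, counter i, dict mutation keyed by
-- list(indexes.keys())[i]) by a detect-then-distribute two-pass structure: alternative, same cost.

-- ===== PORT A =====
-- loop body of A's for-loop; state = (indexes, c, i)
def aStep (st : PySem.Dict String (List Int) × Int × Int) (jp : Int × (Int × Int)) :
    PySem.Dict String (List Int) × Int × Int :=
  if jp.2.2 ≠ st.2.1 then
    let d1 := st.1.modify ((PySem.List.pyGet? st.1.keys st.2.2).getD "") [] (· ++ [jp.1])
    let d2 := if st.2.2 < 3 then
        d1.modify ((PySem.List.pyGet? d1.keys (st.2.2 + 1)).getD "") [] (· ++ [jp.1])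
      else d1
    (d2, jp.2.2, st.2.2 + 1)
  else st

def get_indexes_trames (auto_bins : List Int) (peaks_pred : List Int) (peaks : List Int) :
    List (String × List Int) :=
  let indexes : PySem.Dict String (List Int) :=
    PySem.Dict.ofList [("lock", [(0 : Int)]), ("login", []), ("mdp", [])]
  let c : Int := (PySem.List.pyGet? peaks_pred 0).getD 0   -- peaks_pred[0]; IndexError excluded by Pre_
  let st := (PySem.List.enumerate (peaks.zip peaks_pred)).foldl aStep (indexes, c, 0)
  (st.1.modify "mdp" [] (· ++ [(auto_bins.length : Int) - 1])).items

-- ===== PORT B =====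
-- pass 1 loop body: state = (changes, prev)
def bChangeStep (st : List Int × Int) (jc : Int × Int) : List Int × Int :=
  if jc.2 ≠ st.2 then (st.1 ++ [jc.1], jc.2) else st

def bKeys : List String := ["lock", "login", "mdp"]

-- pass 2 loop body: distribute the k-th change j to keys[k] and keys[k+1]
def bDistStep (d : PySem.Dict String (List Int)) (kj : Int × Int) : PySem.Dict String (List Int) :=
  let d1 := d.modify ((PySem.List.pyGet? bKeys kj.1).getD "") [] (· ++ [kj.2])
  if kj.1 + 1 < (bKeys.length : Int) then
    d1.modify ((PySem.List.pyGet? bKeys (kj.1 + 1)).getD "") [] (· ++ [kj.2])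
  else d1

def get_indexes_trames_alt (auto_bins : List Int) (peaks_pred : List Int) (peaks : List Int) :
    List (String × List Int) :=
  let prev : Int := (PySem.List.pyGet? peaks_pred 0).getD 0   -- peaks_pred[0]; excluded by Pre_
  let st := (PySem.List.enumerate
      (PySem.List.slice peaks_pred none (some (peaks.length : Int)))).foldl bChangeStep ([], prev)
  let indexes : PySem.Dict String (List Int) :=
    PySem.Dict.ofList [("lock", [(0 : Int)]), ("login", []), ("mdp", [])]
  let indexes := (PySem.List.enumerate st.1).foldl bDistStep indexes
  (indexes.modify "mdp" [] (· ++ [(auto_bins.length : Int) - 1])).items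

-- ===== PRECONDITION & SPEC =====
-- number of adjacent class changes of a sequence, starting from class c
def pvChanges : Int → List Int → Nat
  | _, [] => 0
  | c, x :: t => if x ≠ c then pvChanges x t + 1 else pvChanges c t

-- A raises IndexError on empty peaks_pred (peaks_pred[0]) and whenever the class sequence seen by
-- the zip has 3 or more changes (list(indexes.keys())[3]); Pre_ excludes exactly those inputs.
def Pre_get_indexes_trames (auto_bins : List Int) (peaks_pred : List Int) (peaks : List Int) : Prop :=
  peaks_pred ≠ [] ∧ pvChanges (peaks_pred.headD 0) (peaks_pred.take peaks.length) ≤ 2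

instance (auto_bins : List Int) (peaks_pred : List Int) (peaks : List Int) :
    Decidable (Pre_get_indexes_trames auto_bins peaks_pred peaks) := by
  unfold Pre_get_indexes_trames; infer_instance

def pvWitness_get_indexes_trames : List Int × List Int × List Int :=
  ([1, 2, 3], [0, 0, 1, 1], [5, 5, 5, 5])

def Spec_get_indexes_trames (auto_bins : List Int) (peaks_pred : List Int) (peaks : List Int)
    (out : List (String × List Int)) : Prop :=
  out = get_indexes_trames_alt auto_bins peaks_pred peaks

instance (auto_bins : List Int) (peaks_pred : List Int) (peaks : List Int)
    (out : List (String × List Int)) :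
    Decidable (Spec_get_indexes_trames auto_bins peaks_pred peaks out) := by
  unfold Spec_get_indexes_trames; infer_instance

-- ===== CLAIM (what is proved, stated in full; the proofs are below) =====
def Claim_equal_get_indexes_trames : Prop :=
  ∀ (auto_bins : List Int) (peaks_pred : List Int) (peaks : List Int),
    Dom_get_indexes_trames auto_bins peaks_pred peaks →
    Pre_get_indexes_trames auto_bins peaks_pred peaks →
    Spec_get_indexes_trames auto_bins peaks_pred peaks (get_indexes_trames auto_bins peaks_pred peaks)

-- ===== LEMMAS AND PROOFS =====

-- the list of change-point indices, numbering from j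
def changesFrom (c : Int) (j : Int) : List Int → List Int
  | [] => []
  | x :: t => if x ≠ c then j :: changesFrom x (j + 1) t else changesFrom c (j + 1) t

theorem length_changesFrom (cls : List Int) : ∀ (c j : Int),
    (changesFrom c j cls).length = pvChanges c cls := by
  induction cls with
  | nil => intro c j; rfl
  | cons x t ih =>
    intro c j
    by_cases h : x = c
    · simp [changesFrom, pvChanges, h, ih]
    · simp [changesFrom, pvChanges, h, ih]

theorem map_snd_zip_eq_take (xs : List Int) : ∀ (ys : List Int),
    (xs.zip ys).map (·.2) = ys.take xs.length := by
  induction xs with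
  | nil => intro ys; simp
  | cons x t ih =>
    intro ys
    cases ys with
    | nil => simp
    | cons y ty => simp [List.zip_cons_cons, ih]

theorem bChange_loop (cls : List Int) : ∀ (c j : Int) (acc : List Int),
    ((PySem.List.enumerate cls j).foldl bChangeStep (acc, c)).1
      = acc ++ changesFrom c j cls := by
  induction cls with
  | nil => intro c j acc; simp [PySem.List.enumerate_nil, changesFrom]
  | cons x t ih =>
    intro c j acc
    rw [PySem.List.enumerate_cons, List.foldl_cons]
    by_cases h : x = c
    · have hs : bChangeStep (acc, c) (j, x) = (acc, c) := by simp [bChangeStep, h]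
      rw [hs, ih c (j + 1) acc]
      simp [changesFrom, h]
    · have hs : bChangeStep (acc, c) (j, x) = (acc ++ [j], x) := by simp [bChangeStep, h]
      rw [hs, ih x (j + 1) (acc ++ [j])]
      simp [changesFrom, h]

theorem keys_modify_mem (d : PySem.Dict String (List Int)) (k : String)
    (f : List Int → List Int) (hk : k ∈ d.keys) :
    (d.modify k [] f).keys = d.keys := by
  rw [PySem.Dict.keys_modify]
  exact PySem.Dict.keys_insert_of_contains d _ ((PySem.Dict.contains_iff_mem_keys d k).mpr hk)

theorem bDistStep_keys (d : PySem.Dict String (List Int)) (k j : Int)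
    (hkeys : d.keys = bKeys) (hk : k = 0 ∨ k = 1) :
    (bDistStep d (k, j)).keys = bKeys := by
  rcases hk with h | h <;> subst h
  · have g0 : (PySem.List.pyGet? bKeys 0).getD "" = "lock" := by decide
    have g1 : (PySem.List.pyGet? bKeys ((0 : Int) + 1)).getD "" = "login" := by decide
    have hlock : "lock" ∈ d.keys := by rw [hkeys]; decide
    have hk1 : (d.modify "lock" [] (· ++ [j])).keys = bKeys := by
      rw [keys_modify_mem d _ _ hlock, hkeys]
    have hlogin : "login" ∈ (d.modify "lock" [] (· ++ [j])).keys := by rw [hk1]; decide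
    simp only [bDistStep]
    rw [if_pos (by norm_num [bKeys] : (0 : Int) + 1 < (bKeys.length : Int)), g0, g1]
    rw [keys_modify_mem _ _ _ hlogin, hk1]
  · have g0 : (PySem.List.pyGet? bKeys 1).getD "" = "login" := by decide
    have g1 : (PySem.List.pyGet? bKeys ((1 : Int) + 1)).getD "" = "mdp" := by decide
    have hlogin : "login" ∈ d.keys := by rw [hkeys]; decide
    have hk1 : (d.modify "login" [] (· ++ [j])).keys = bKeys := by
      rw [keys_modify_mem d _ _ hlogin, hkeys]
    have hmdp : "mdp" ∈ (d.modify "login" [] (· ++ [j])).keys := by rw [hk1]; decide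
    simp only [bDistStep]
    rw [if_pos (by norm_num [bKeys] : (1 : Int) + 1 < (bKeys.length : Int)), g0, g1]
    rw [keys_modify_mem _ _ _ hmdp, hk1]

theorem aStep_eq_bDistStep (d : PySem.Dict String (List Int)) (c j i : Int) (a : Int × Int)
    (h : a.2 ≠ c) (hkeys : d.keys = bKeys) (hk : i = 0 ∨ i = 1) :
    aStep (d, c, i) (j, a) = (bDistStep d (i, j), a.2, i + 1) := by
  rcases hk with hi | hi <;> subst hi
  · have g0 : (PySem.List.pyGet? d.keys 0).getD "" = "lock" := by rw [hkeys]; decide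
    have hlock : "lock" ∈ d.keys := by rw [hkeys]; decide
    have hk1 : (d.modify "lock" [] (· ++ [j])).keys = bKeys := by
      rw [keys_modify_mem d _ _ hlock, hkeys]
    have g1 : (PySem.List.pyGet? (d.modify "lock" [] (· ++ [j])).keys ((0 : Int) + 1)).getD ""
        = "login" := by rw [hk1]; decide
    have gb0 : (PySem.List.pyGet? bKeys 0).getD "" = "lock" := by decide
    have gb1 : (PySem.List.pyGet? bKeys ((0 : Int) + 1)).getD "" = "login" := by decide
    simp only [aStep, bDistStep, if_pos h]
    rw [if_pos (by decide : (0 : Int) < 3),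
        if_pos (by norm_num [bKeys] : (0 : Int) + 1 < (bKeys.length : Int))]
    rw [g0, g1, gb0, gb1]
  · have g0 : (PySem.List.pyGet? d.keys 1).getD "" = "login" := by rw [hkeys]; decide
    have hlogin : "login" ∈ d.keys := by rw [hkeys]; decide
    have hk1 : (d.modify "login" [] (· ++ [j])).keys = bKeys := by
      rw [keys_modify_mem d _ _ hlogin, hkeys]
    have g1 : (PySem.List.pyGet? (d.modify "login" [] (· ++ [j])).keys ((1 : Int) + 1)).getD ""
        = "mdp" := by rw [hk1]; decide
    have gb0 : (PySem.List.pyGet? bKeys 1).getD "" = "login" := by decide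
    have gb1 : (PySem.List.pyGet? bKeys ((1 : Int) + 1)).getD "" = "mdp" := by decide
    simp only [aStep, bDistStep, if_pos h]
    rw [if_pos (by decide : (1 : Int) < 3),
        if_pos (by norm_num [bKeys] : (1 : Int) + 1 < (bKeys.length : Int))]
    rw [g0, g1, gb0, gb1]

theorem aLoop_eq_dist (l : List (Int × Int)) : ∀ (c j i : Int)
    (d : PySem.Dict String (List Int)),
    0 ≤ i → d.keys = bKeys →
    i + (changesFrom c j (l.map (·.2))).length ≤ 2 →
    ((PySem.List.enumerate l j).foldl aStep (d, c, i)).1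
      = (PySem.List.enumerate (changesFrom c j (l.map (·.2))) i).foldl bDistStep d := by
  induction l with
  | nil => intro c j i d _ _ _; simp [PySem.List.enumerate_nil, changesFrom]
  | cons a t ih =>
    intro c j i d hi hkeys hcnt
    rw [PySem.List.enumerate_cons, List.foldl_cons]
    by_cases h : a.2 = c
    · have hstep : aStep (d, c, i) (j, a) = (d, c, i) := by simp [aStep, h]
      simp only [List.map_cons, changesFrom, h] at hcnt ⊢
      rw [if_neg (by simp : ¬ (c ≠ c))] at hcnt ⊢
      rw [hstep]
      exact ih c (j + 1) i d hi hkeys hcnt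
    · simp only [List.map_cons, changesFrom, if_pos (h : a.2 ≠ c)] at hcnt ⊢
      push_cast [List.length_cons] at hcnt
      have hi01 : i = 0 ∨ i = 1 := by omega
      rw [aStep_eq_bDistStep d c j i a h hkeys hi01]
      rw [PySem.List.enumerate_cons, List.foldl_cons]
      exact ih a.2 (j + 1) (i + 1) (bDistStep d (i, j)) (by omega)
        (bDistStep_keys d i j hkeys hi01) (by omega)

theorem take_eq_slice (pp : List Int) (n : Nat) :
    pp.take n = PySem.List.slice pp none (some (n : Int)) := by
  rw [PySem.List.slice_to_natCast]

theorem get_indexes_trames_spec : Claim_equal_get_indexes_trames := by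
  intro ab pp pk _ hpre
  obtain ⟨hne, hcnt⟩ := hpre
  cases pp with
  | nil => exact absurd rfl hne
  | cons p rest =>
    simp only [Spec_get_indexes_trames, get_indexes_trames, get_indexes_trames_alt,
      PySem.List.pyGet?_zero_cons, Option.getD_some]
    rw [← take_eq_slice]
    rw [bChange_loop, List.nil_append]
    have hd0 : (PySem.Dict.ofList
        [("lock", [(0 : Int)]), ("login", ([] : List Int)), ("mdp", ([] : List Int))]).keys
        = bKeys := by decide
    have hmap : ((pk.zip (p :: rest)).map (·.2)) = (p :: rest).take pk.length :=
      map_snd_zip_eq_take pk (p :: rest)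
    have hcnt' : (0 : Int) + ((changesFrom p 0 ((pk.zip (p :: rest)).map (·.2))).length : Int) ≤ 2 := by
      rw [hmap, length_changesFrom]
      have h2 : pvChanges ((p :: rest).headD 0) ((p :: rest).take pk.length) ≤ 2 := hcnt
      simp only [List.headD_cons] at h2
      omega
    rw [aLoop_eq_dist (pk.zip (p :: rest)) p 0 0 _ (by omega) hd0 hcnt']
    rw [hmap]
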